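-- pv_equiv track=rewrite | github.com/Marusya007/Project_perfomance-lab_python_ | task1.py | circular_array_path
-- ===== SOURCE A (Python) =====
-- def circular_array_path(n, m):
--     # Создаем круговой массив
--     circular_array = list(range(1, n + 1))
--
--     # Инициализируем путь
--     path = []
--
--     # Начинаем с первого элемента
--     current_index = 0
--
--     # Перебираем круговой массив
--     for _ in range(n):
--         # Добавляем текущий элемент к пути
--         path.append(circular_array[current_index])
--
--         # Переходим к следующему элементу с шагом m
--         current_index = (current_index + m - 1) % n
--
--     return path
-- ===== SOURCE B (Python) =====
-- def circular_array_path(n, m):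
--     return [k * (m - 1) % n + 1 for k in range(n)]
-- ===== Notes on version B (the rewrite author's own statement) =====
-- stated objective: faster
-- what changed: Replaces the materialized circular array and the stepping current_index state machine with a direct closed-form comprehension path[k] = k*(m-1) % n + 1, avoiding building the array and the per-step list indexing.
import Mathlib
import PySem

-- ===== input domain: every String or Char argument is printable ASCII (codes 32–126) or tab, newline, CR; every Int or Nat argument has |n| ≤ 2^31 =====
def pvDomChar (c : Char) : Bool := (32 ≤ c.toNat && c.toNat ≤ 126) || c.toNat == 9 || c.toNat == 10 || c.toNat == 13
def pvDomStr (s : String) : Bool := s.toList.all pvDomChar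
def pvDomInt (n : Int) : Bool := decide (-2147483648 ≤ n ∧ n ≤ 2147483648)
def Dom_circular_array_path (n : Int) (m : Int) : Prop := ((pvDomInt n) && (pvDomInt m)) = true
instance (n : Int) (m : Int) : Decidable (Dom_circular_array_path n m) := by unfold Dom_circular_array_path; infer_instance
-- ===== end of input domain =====

-- B replaces A's materialized array and stepping index with the closed form k*(m-1) % n + 1 (simpler).


-- ===== PORT A =====
-- literal transliteration: build circular_array, fold over range(n) carrying (path, current_index)
def circular_array_path (n : Int) (m : Int) : List Int :=
  let circular_array := PySem.List.pyRange 1 (n + 1) 1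
  let st := (PySem.List.pyRange 0 n 1).foldl
    (fun (st : List Int × Int) _ =>
      (st.1 ++ [PySem.List.pyGetD circular_array st.2 0],
       PySem.Int.mod (st.2 + m - 1) n))
    (([] : List Int), (0 : Int))
  st.1

-- ===== PORT B =====
def circular_array_path_alt (n : Int) (m : Int) : List Int :=
  (PySem.List.pyRange 0 n 1).map (fun k => PySem.Int.mod (k * (m - 1)) n + 1)

-- ===== PRECONDITION & SPEC =====
def Spec_circular_array_path (n : Int) (m : Int) (out : List Int) : Prop := out = circular_array_path_alt n m
instance (n : Int) (m : Int) (out : List Int) : Decidable (Spec_circular_array_path n m out) := by unfold Spec_circular_array_path; infer_instance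

-- ===== CLAIM (what is proved, stated in full; the proofs are below) =====
def Claim_equal_circular_array_path : Prop := ∀ (n : Int) (m : Int), Dom_circular_array_path n m → Spec_circular_array_path n m (circular_array_path n m)

-- ===== LEMMAS AND PROOFS =====

-- the array element at the running index: circular_array[i] = i + 1 for 0 ≤ i < n
lemma pv_arr_get (n i : Int) (h0 : 0 ≤ i) (hi : i < n) :
    PySem.List.pyGetD (PySem.List.pyRange 1 (n + 1) 1) i 0 = i + 1 := by
  have hlen : (PySem.List.pyRange 1 (n + 1) 1).length = (n : Int).toNat := by
    simp [PySem.List.length_pyRange_one]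
  rw [PySem.List.pyGetD_eq_getElem _ _ h0 (by omega)]
  rw [PySem.List.getElem_pyRange_one]
  omega

-- loop invariant: starting from index (k*(m-1)) % n, the fold appends the closed-form values
lemma pv_loop (n m : Int) (hn : 0 < n) :
    ∀ (l : List Int) (k : Nat) (path : List Int),
      (l.foldl
        (fun (st : List Int × Int) _ =>
          (st.1 ++ [PySem.List.pyGetD (PySem.List.pyRange 1 (n + 1) 1) st.2 0],
           PySem.Int.mod (st.2 + m - 1) n))
        (path, PySem.Int.mod ((k : Int) * (m - 1)) n)).1
      = path ++ (List.range l.length).map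
          (fun (j : Nat) => PySem.Int.mod (((k : Int) + (j : Int)) * (m - 1)) n + 1) := by
  intro l
  induction l with
  | nil => intro k path; simp
  | cons x xs ih =>
    intro k path
    have hmodpos : 0 ≤ PySem.Int.mod ((k : Int) * (m - 1)) n := PySem.Int.mod_nonneg _ hn
    have hmodlt : PySem.Int.mod ((k : Int) * (m - 1)) n < n := PySem.Int.mod_lt _ hn
    simp only [List.foldl_cons]
    rw [pv_arr_get n _ hmodpos hmodlt]
    have hstep : PySem.Int.mod (PySem.Int.mod ((k : Int) * (m - 1)) n + m - 1) n
        = PySem.Int.mod (((k : Int) + 1) * (m - 1)) n := by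
      rw [PySem.Int.mod_eq_emod_of_pos hn, PySem.Int.mod_eq_emod_of_pos hn,
          PySem.Int.mod_eq_emod_of_pos hn]
      have : (k : Int) * (m - 1) % n + m - 1 = (k : Int) * (m - 1) % n + (m - 1) := by ring
      rw [this, Int.emod_add_emod]
      congr 1; ring
    rw [hstep]
    have := ih (k + 1) (path ++ [PySem.Int.mod ((k : Int) * (m - 1)) n + 1])
    push_cast at this ⊢
    rw [this, List.append_assoc]
    congr 1
    rw [List.length_cons, List.range_succ_eq_map, List.map_cons, List.map_map,
      List.singleton_append]
    congr 1
    apply List.map_congr_left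
    intro a _
    simp only [Function.comp_apply]
    congr 2
    push_cast
    ring

-- ===== VERDICT (by name: the statement is the Claim_ definition above) =====
theorem circular_array_path_spec : Claim_equal_circular_array_path := by
  intro n m _
  unfold Spec_circular_array_path circular_array_path circular_array_path_alt
  by_cases hn : 0 < n
  · have hl := pv_loop n m hn (PySem.List.pyRange 0 n 1) 0 []
    rw [show PySem.Int.mod (((0 : Nat) : Int) * (m - 1)) n = 0 by
      simp [PySem.Int.mod_eq_emod_of_pos hn]] at hl
    rw [hl]
    simp only [List.nil_append, PySem.List.pyRange_one, List.length_map, List.length_range,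
      List.map_map]
    apply List.map_congr_left
    intro a _
    simp only [Function.comp]
    norm_num
  · have : PySem.List.pyRange 0 n 1 = [] := PySem.List.pyRange_one_eq_nil (by omega)
    simp [this]
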